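-- pv_equiv track=rewrite | github.com/Anastastr/Modul_2 | homework_modul_2.py | need_password
-- ===== SOURCE A (Python) =====
-- def need_password(number):
--     password = ' '
--     for a in range(1, number):
--         for b in range(2, number):
--             if b <= a:
--                 continue
--             if number % (a + b) == 0:
--                 password += str(a) + str(b)
--     return password
-- ===== SOURCE B (Python) =====
-- def need_password(number):
--     # Precompute the divisors of number once, then for each a pick only
--     # divisor sums s = a + b with b > a, instead of scanning all pairs.
--     divisors = [s for s in range(3, number + 1) if number % s == 0]
--     password = ' '
--     for a in range(1, number - 1):
--         for s in divisors:
--             if s > 2 * a: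
--                 password += str(a) + str(s - a)
--     return password
-- ===== Notes on version B (the rewrite author's own statement) =====
-- stated objective: faster
-- what changed: Instead of scanning all O(n^2) pairs (a,b) and testing number % (a+b) == 0 for each, B enumerates the divisors of number once and, for each a, emits only the pairs (a, s-a) for divisors s > 2a, keeping the same (a,b)-ascending output order.
import Mathlib
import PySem

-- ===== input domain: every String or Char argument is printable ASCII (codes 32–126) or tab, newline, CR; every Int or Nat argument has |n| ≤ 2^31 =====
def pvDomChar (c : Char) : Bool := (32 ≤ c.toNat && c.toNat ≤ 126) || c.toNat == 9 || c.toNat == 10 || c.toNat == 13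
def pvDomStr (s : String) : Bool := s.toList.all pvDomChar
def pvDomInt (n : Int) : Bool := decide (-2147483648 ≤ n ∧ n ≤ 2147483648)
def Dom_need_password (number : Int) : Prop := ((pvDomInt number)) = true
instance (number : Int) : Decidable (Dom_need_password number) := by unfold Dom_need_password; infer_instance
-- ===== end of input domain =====

-- B precomputes the divisors of `number` once and, for each a, emits only pairs (a, s-a)
-- with s a divisor > 2a, instead of testing every pair (a, b); objective: faster.


-- ===== PORT A =====
def need_password (number : Int) : String :=
  (PySem.List.pyRange 1 number 1).foldl (fun password a =>
    (PySem.List.pyRange 2 number 1).foldl (fun password b =>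
      if b ≤ a then password
      else if PySem.Int.mod number (a + b) = 0 then
        password ++ (PySem.Int.toStr a ++ PySem.Int.toStr b)
      else password) password) " "

-- ===== PORT B =====
def need_password_alt (number : Int) : String :=
  let divisors := (PySem.List.pyRange 3 (number + 1) 1).filter
    (fun s => decide (PySem.Int.mod number s = 0))
  (PySem.List.pyRange 1 (number - 1) 1).foldl (fun password a =>
    divisors.foldl (fun password s =>
      if 2 * a < s then password ++ (PySem.Int.toStr a ++ PySem.Int.toStr (s - a))
      else password) password) " "

-- ===== PRECONDITION & SPEC =====
def Spec_need_password (number : Int) (out : String) : Prop := out = need_password_alt number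
instance (number : Int) (out : String) : Decidable (Spec_need_password number out) := by unfold Spec_need_password; infer_instance

-- ===== CLAIM (what is proved, stated in full; the proofs are below) =====
def Claim_equal_need_password : Prop := ∀ (number : Int), Dom_need_password number → Spec_need_password number (need_password number)

-- ===== LEMMAS AND PROOFS =====

-- concatenation of a list of strings (proof-side normal form of the string accumulation)
def scat : List String → String
  | [] => ""
  | x :: xs => x ++ scat xs

-- the (a,b)-pair strings A's inner loop appends for a given a, as a list
def paList (number a : Int) : List String :=
  ((PySem.List.pyRange 2 number 1).filter
    (fun b => decide (a < b ∧ PySem.Int.mod number (a + b) = 0))).map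
    (fun b => PySem.Int.toStr a ++ PySem.Int.toStr b)

-- the pair strings B's inner loop appends for a given a, as a list
def pbList (number a : Int) : List String :=
  (((PySem.List.pyRange 3 (number + 1) 1).filter
      (fun s => decide (PySem.Int.mod number s = 0))).filter
    (fun s => decide (2 * a < s))).map
    (fun s => PySem.Int.toStr a ++ PySem.Int.toStr (s - a))

lemma foldl_if_cat (p : Int → Prop) [DecidablePred p] (g : Int → String) :
    ∀ (l : List Int) (acc : String),
      l.foldl (fun pw x => if p x then pw ++ g x else pw) acc
        = acc ++ scat ((l.filter (fun x => decide (p x))).map g) := by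
  intro l
  induction l with
  | nil => intro acc; simp [scat]
  | cons x xs ih =>
    intro acc
    by_cases hx : p x <;> simp [hx, ih, scat, String.append_assoc]

lemma innerA_eq (number a : Int) (acc : String) :
    (PySem.List.pyRange 2 number 1).foldl (fun password b =>
      if b ≤ a then password
      else if PySem.Int.mod number (a + b) = 0 then
        password ++ (PySem.Int.toStr a ++ PySem.Int.toStr b)
      else password) acc = acc ++ scat (paList number a) := by
  have hf : (fun (password : String) (b : Int) =>
      if b ≤ a then password
      else if PySem.Int.mod number (a + b) = 0 then
        password ++ (PySem.Int.toStr a ++ PySem.Int.toStr b)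
      else password)
      = (fun (pw : String) (b : Int) =>
        if a < b ∧ PySem.Int.mod number (a + b) = 0 then
          pw ++ (PySem.Int.toStr a ++ PySem.Int.toStr b) else pw) := by
    funext pw b
    by_cases h1 : b ≤ a
    · rw [if_pos h1, if_neg (by rintro ⟨hab, -⟩; omega)]
    · rw [if_neg h1]
      by_cases h2 : PySem.Int.mod number (a + b) = 0
      · rw [if_pos h2, if_pos ⟨by omega, h2⟩]
      · rw [if_neg h2, if_neg (fun h => h2 h.2)]
  rw [hf, foldl_if_cat]
  rfl

lemma innerB_eq (number a : Int) (acc : String) :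
    ((PySem.List.pyRange 3 (number + 1) 1).filter
      (fun s => decide (PySem.Int.mod number s = 0))).foldl (fun password s =>
        if 2 * a < s then password ++ (PySem.Int.toStr a ++ PySem.Int.toStr (s - a))
        else password) acc = acc ++ scat (pbList number a) := by
  rw [foldl_if_cat]
  rfl

lemma outer_eq (F : Int → List String) :
    ∀ (l : List Int) (acc : String),
      l.foldl (fun pw a => pw ++ scat (F a)) acc = acc ++ scat (l.flatMap F) := by
  intro l
  induction l with
  | nil => intro acc; simp [scat]
  | cons x xs ih =>
    intro acc
    have hcat : ∀ (u v : List String), scat (u ++ v) = scat u ++ scat v := by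
      intro u v
      induction u with
      | nil => simp [scat]
      | cons y ys ihy => simp [scat, ihy, String.append_assoc]
    simp [ih, hcat, String.append_assoc]

lemma need_password_closed (number : Int) :
    need_password number
      = " " ++ scat ((PySem.List.pyRange 1 number 1).flatMap (paList number)) := by
  unfold need_password
  have hf : (fun (password : String) (a : Int) =>
      (PySem.List.pyRange 2 number 1).foldl (fun password b =>
        if b ≤ a then password
        else if PySem.Int.mod number (a + b) = 0 then
          password ++ (PySem.Int.toStr a ++ PySem.Int.toStr b)
        else password) password)
      = (fun (pw : String) (a : Int) => pw ++ scat (paList number a)) := by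
    funext pw a
    exact innerA_eq number a pw
  rw [hf, outer_eq]

lemma need_password_alt_closed (number : Int) :
    need_password_alt number
      = " " ++ scat ((PySem.List.pyRange 1 (number - 1) 1).flatMap (pbList number)) := by
  unfold need_password_alt
  have hf : (fun (password : String) (a : Int) =>
      ((PySem.List.pyRange 3 (number + 1) 1).filter
        (fun s => decide (PySem.Int.mod number s = 0))).foldl (fun password s =>
          if 2 * a < s then password ++ (PySem.Int.toStr a ++ PySem.Int.toStr (s - a))
          else password) password)
      = (fun (pw : String) (a : Int) => pw ++ scat (pbList number a)) := by
    funext pw a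
    exact innerB_eq number a pw
  simp only []
  rw [hf, outer_eq]

-- shifting a unit-step range
lemma map_add_pyRange (a lo hi : Int) :
    (PySem.List.pyRange lo hi 1).map (fun b => a + b)
      = PySem.List.pyRange (a + lo) (a + hi) 1 := by
  rw [PySem.List.pyRange_one, PySem.List.pyRange_one]
  have h : a + hi - (a + lo) = hi - lo := by ring
  rw [h, List.map_map]
  apply List.map_congr_left
  intro k _
  simp
  ring

-- the per-a pair lists agree for every a A's loop visits below number-1
lemma paList_eq_pbList (number a : Int) (ha1 : 1 ≤ a) (ha2 : a < number - 1) :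
    paList number a = pbList number a := by
  have hnum : 3 ≤ number := by omega
  -- merge B's two filters
  have hmerge : pbList number a
      = ((PySem.List.pyRange 3 (number + 1) 1).filter
          (fun s => decide (PySem.Int.mod number s = 0 ∧ 2 * a < s))).map
          (fun s => PySem.Int.toStr a ++ PySem.Int.toStr (s - a)) := by
    unfold pbList
    rw [List.filter_filter]
    congr 1
    apply List.filter_congr
    intro s _
    simp [and_comm]
  -- the filtered divisor range equals A's filtered b-range shifted by a
  have hkey : (PySem.List.pyRange 3 (number + 1) 1).filter
        (fun s => decide (PySem.Int.mod number s = 0 ∧ 2 * a < s))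
      = ((PySem.List.pyRange 2 number 1).filter
          (fun b => decide (a < b ∧ PySem.Int.mod number (a + b) = 0))).map
          (fun b => a + b) := by
    have hshift := map_add_pyRange a 2 number
    have hstep : ((PySem.List.pyRange 2 number 1).filter
          (fun b => decide (a < b ∧ PySem.Int.mod number (a + b) = 0))).map (fun b => a + b)
        = (PySem.List.pyRange (a + 2) (a + number) 1).filter
          (fun s => decide (PySem.Int.mod number s = 0 ∧ 2 * a < s)) := by
      rw [← hshift, List.filter_map]
      congr 1
      apply List.filter_congr
      intro b _
      simp only [Function.comp]
      exact decide_eq_decide.mpr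
        ⟨fun ⟨h1, h2⟩ => ⟨h2, by omega⟩, fun ⟨h1, h2⟩ => ⟨by omega, h1⟩⟩
    rw [hstep]
    -- split both ranges at the common core [a+2, number+1)
    have hsplitL : PySem.List.pyRange 3 (number + 1) 1
        = PySem.List.pyRange 3 (a + 2) 1 ++ PySem.List.pyRange (a + 2) (number + 1) 1 :=
      PySem.List.pyRange_one_append 3 (a + 2) (number + 1) (by omega) (by omega)
    have hsplitR : PySem.List.pyRange (a + 2) (a + number) 1
        = PySem.List.pyRange (a + 2) (number + 1) 1
            ++ PySem.List.pyRange (number + 1) (a + number) 1 :=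
      PySem.List.pyRange_one_append (a + 2) (number + 1) (a + number) (by omega) (by omega)
    rw [hsplitL, hsplitR, List.filter_append, List.filter_append]
    have hlo : (PySem.List.pyRange 3 (a + 2) 1).filter
        (fun s => decide (PySem.Int.mod number s = 0 ∧ 2 * a < s)) = [] := by
      apply List.filter_eq_nil_iff.mpr
      intro s hs
      rw [PySem.List.mem_pyRange_one] at hs
      simp only [decide_eq_true_eq]
      rintro ⟨-, h⟩
      omega
    have hhi : (PySem.List.pyRange (number + 1) (a + number) 1).filter
        (fun s => decide (PySem.Int.mod number s = 0 ∧ 2 * a < s)) = [] := by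
      apply List.filter_eq_nil_iff.mpr
      intro s hs
      rw [PySem.List.mem_pyRange_one] at hs
      have hpos : 0 < s := by omega
      have : PySem.Int.mod number s = number := by
        rw [PySem.Int.mod_eq_emod_of_pos hpos]
        exact Int.emod_eq_of_lt (by omega) (by omega)
      simp only [decide_eq_true_eq]
      rintro ⟨hm, -⟩
      rw [this] at hm
      omega
    rw [hlo, hhi]
    simp
  unfold paList
  rw [hmerge, hkey, List.map_map]
  apply List.map_congr_left
  intro b _
  simp [Function.comp]

-- the flattened pair lists agree (A's extra a = number-1 contributes nothing)
lemma flatMap_eq (number : Int) :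
    (PySem.List.pyRange 1 number 1).flatMap (paList number)
      = (PySem.List.pyRange 1 (number - 1) 1).flatMap (pbList number) := by
  by_cases h2 : number ≤ 1
  · rw [PySem.List.pyRange_one_eq_nil h2, PySem.List.pyRange_one_eq_nil (by omega)]
    simp
  · have hsplit : PySem.List.pyRange 1 number 1
        = PySem.List.pyRange 1 (number - 1) 1 ++ [number - 1] := by
      have := PySem.List.pyRange_one_succ_right (a := 1) (b := number - 1) (by omega)
      have heq : number - 1 + 1 = number := by ring
      rw [heq] at this
      exact this
    rw [hsplit, List.flatMap_append]
    have hlast : paList number (number - 1) = [] := by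
      unfold paList
      have : (PySem.List.pyRange 2 number 1).filter
          (fun b => decide ((number - 1) < b ∧ PySem.Int.mod number ((number - 1) + b) = 0))
          = [] := by
        apply List.filter_eq_nil_iff.mpr
        intro b hb
        rw [PySem.List.mem_pyRange_one] at hb
        simp
        intro h
        omega
      rw [this, List.map_nil]
    simp [hlast]
    exact List.flatMap_congr (fun a ha => by
      rw [PySem.List.mem_pyRange_one] at ha
      exact paList_eq_pbList number a ha.1 (by omega))

-- ===== VERDICT (by name: the statement is the Claim_ definition above) =====
theorem need_password_spec : Claim_equal_need_password := by
  intro number _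
  unfold Spec_need_password
  rw [need_password_closed, need_password_alt_closed, flatMap_eq]
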